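-- pv_equiv track=rewrite | github.com/learnore/helloshen | z_huawei_od/24_od/100/13.py | restore_image
-- ===== SOURCE A (Python) =====
-- def restore_image(compressed_data):
--     # 解析行数、列数
--     m, n = compressed_data[0], compressed_data[1]
--     compressed_data = compressed_data[2:]
--     new_compressed_data = []
--     for i in range(0, len(compressed_data), 2):
--         for j in range(compressed_data[i + 1]):
--             new_compressed_data += [compressed_data[i]]
--
--     # 解析压缩数据
--     results = []
--     count = 0
--     for i in range(m):
--         temp_res = []
--         for j in range(n):
--             temp_res += [new_compressed_data[count]]
--             count += 1
--
--         results.append(temp_res)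
--
--     return results
-- ===== SOURCE B (Python) =====
-- def restore_image(compressed_data):
--     m, n = compressed_data[0], compressed_data[1]
--     grid = [[] for _ in range(m)]
--     r = 0
--     for i in range(2, len(compressed_data), 2):
--         value, count = compressed_data[i], compressed_data[i + 1]
--         for _ in range(count):
--             while r < m and len(grid[r]) >= n:
--                 r += 1
--             if r >= m:
--                 return grid
--             grid[r].append(value)
--     return grid
-- ===== Notes on version B (the rewrite author's own statement) =====
-- stated objective: alternative
-- what changed: B never builds A's flat RLE-expanded intermediate list: it preallocates the m rows and streams each run's repeated value directly into the grid, advancing a row cursor past full rows and returning as soon as the grid is full; Pre_ excludes the inputs on which A raises IndexError (fewer than two leading ints, an odd run list, or runs supplying fewer than m*n elements).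
import Mathlib
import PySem

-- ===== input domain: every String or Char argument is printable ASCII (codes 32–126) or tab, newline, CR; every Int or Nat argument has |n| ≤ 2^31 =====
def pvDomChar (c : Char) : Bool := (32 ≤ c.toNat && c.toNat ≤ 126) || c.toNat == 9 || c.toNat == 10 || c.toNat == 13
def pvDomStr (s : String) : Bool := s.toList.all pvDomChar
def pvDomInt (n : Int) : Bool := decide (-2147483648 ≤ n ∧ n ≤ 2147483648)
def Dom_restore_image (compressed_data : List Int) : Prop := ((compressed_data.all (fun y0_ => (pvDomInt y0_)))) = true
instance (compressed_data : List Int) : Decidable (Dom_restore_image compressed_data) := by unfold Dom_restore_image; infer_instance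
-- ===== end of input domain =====

-- B streams the run pairs directly into m preallocated rows behind a row cursor, never
-- building A's flat RLE-expanded intermediate list (objective: alternative decomposition).

-- ===== PORT A =====
-- reads out of range (IndexError in Python) are ported with default 0; Pre_ excludes those inputs
def restore_image (compressed_data : List Int) : List (List Int) :=
  let m := PySem.List.pyGetD compressed_data 0 0
  let n := PySem.List.pyGetD compressed_data 1 0
  let cd := PySem.List.slice compressed_data (some 2) none
  let newd := ((PySem.List.pyRange 0 (PySem.List.len cd) 2).foldl
    (fun acc i =>
      (PySem.List.pyRange 0 (PySem.List.pyGetD cd (i + 1) 0) 1).foldl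
        (fun a _ => a.push (PySem.List.pyGetD cd i 0)) acc) (#[] : Array Int)).toList
  let st := (PySem.List.pyRange 0 m 1).foldl
    (fun (st : List (List Int) × Int) _ =>
      let inner := (PySem.List.pyRange 0 n 1).foldl
        (fun (t : List Int × Int) _ => (t.1 ++ [PySem.List.pyGetD newd t.2 0], t.2 + 1))
        (([] : List Int), st.2)
      (st.1 ++ [inner.1], inner.2)) (([] : List (List Int)), (0 : Int))
  st.1

-- ===== PORT B =====
-- Source B's 'while r < m and len(grid[r]) >= n: r += 1' (the short-circuit guarantees the
-- index is in range, so pyGetD with default [] is exact)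
def pvAdv (grid : List (List Int)) (n m r : Int) : Int :=
  if h : r < m ∧ n ≤ ((PySem.List.pyGetD grid r []).length : Int) then pvAdv grid n m (r + 1)
  else r
termination_by (m - r).toNat
decreasing_by omega

-- one iteration of Source B's inner 'for _ in range(count)' body; the Bool records that
-- Source B's early 'return grid' has fired (grid[r].append is List.modify: 0 ≤ r < len grid here)
def pvStep (m n v : Int) (s : List (List Int) × Int × Bool) : List (List Int) × Int × Bool :=
  if s.2.2 then s
  else
    let r := pvAdv s.1 n m s.2.1
    if m ≤ r then (s.1, r, true)
    else (s.1.modify r.toNat (fun row => row ++ [v]), r, false)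

def restore_image_alt (compressed_data : List Int) : List (List Int) :=
  let m := PySem.List.pyGetD compressed_data 0 0
  let n := PySem.List.pyGetD compressed_data 1 0
  let grid0 := (PySem.List.pyRange 0 m 1).map (fun _ => ([] : List Int))
  let st := (PySem.List.pyRange 2 (PySem.List.len compressed_data) 2).foldl
    (fun (s : List (List Int) × Int × Bool) i =>
      let value := PySem.List.pyGetD compressed_data i 0
      let cnt := PySem.List.pyGetD compressed_data (i + 1) 0
      (PySem.List.pyRange 0 cnt 1).foldl (fun s' _ => pvStep m n value s') s)
    (grid0, (0 : Int), false)
  st.1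

-- ===== PRECONDITION & SPEC =====
-- Pre_ excludes exactly the inputs on which A raises IndexError: fewer than two leading
-- ints, an odd run list, or runs supplying fewer than m*n elements when m > 0 and n > 0.
def Pre_restore_image (compressed_data : List Int) : Prop :=
  2 ≤ compressed_data.length ∧ compressed_data.length % 2 = 0 ∧
  (0 < compressed_data.getD 0 0 → 0 < compressed_data.getD 1 0 →
    compressed_data.getD 0 0 * compressed_data.getD 1 0 ≤
      ((List.range ((compressed_data.length - 2) / 2)).map
        (fun k => max (compressed_data.getD (3 + 2 * k) 0) 0)).sum)
instance (compressed_data : List Int) : Decidable (Pre_restore_image compressed_data) := by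
  unfold Pre_restore_image; infer_instance

def pvWitness_restore_image : List Int := [2, 2, 5, 4]

def Spec_restore_image (compressed_data : List Int) (out : List (List Int)) : Prop := out = restore_image_alt compressed_data
instance (compressed_data : List Int) (out : List (List Int)) : Decidable (Spec_restore_image compressed_data out) := by unfold Spec_restore_image; infer_instance

-- ===== CLAIM (what is proved, stated in full; the proofs are below) =====
def Claim_equal_restore_image : Prop := ∀ (compressed_data : List Int), Dom_restore_image compressed_data → Pre_restore_image compressed_data → Spec_restore_image compressed_data (restore_image compressed_data)

-- ===== LEMMAS AND PROOFS =====

-- the run pairs (value, count) encoded in the tail, and their RLE expansion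
def pvRuns (rest : List Int) : List (Int × Int) :=
  (List.range (rest.length / 2)).map (fun k => (rest.getD (2 * k) 0, rest.getD (2 * k + 1) 0))

def pvExpand (rs : List (Int × Int)) : List Int :=
  rs.flatMap (fun r => List.replicate r.2.toNat r.1)

def pvChunks (P : List Int) (N q : Nat) : List (List Int) :=
  (List.range q).map (fun i => (P.drop (i * N)).take N)

def pvRowAt (L : List Int) (N : Nat) (c : Int) : List Int :=
  (List.range N).map (fun (j : Nat) => PySem.List.pyGetD L (c + (j : Int)) 0)

-- invariant of B's fold: after P elements have been streamed in, the grid holds the first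
-- m*n of them in rows of n, the cursor is sane, and 'done' implies the grid was full
def pvRel (m n : Int) (P : List Int) (s : List (List Int) × Int × Bool) : Prop :=
  s.1 = pvChunks (P.take (m.toNat * n.toNat)) n.toNat m.toNat ∧ 0 ≤ s.2.1 ∧
  (s.2.2 = true → m.toNat * n.toNat ≤ P.length) ∧
  (s.2.2 = false → s.2.1.toNat ≤ min P.length (m.toNat * n.toNat) / n.toNat)

lemma pv_rep_fold (l : List Int) (acc : Array Int) (v : Int) :
    (l.foldl (fun a _ => a.push v) acc).toList = acc.toList ++ List.replicate l.length v := by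
  induction l generalizing acc with
  | nil => simp
  | cons x t ih =>
    rw [List.foldl_cons, ih, Array.toList_push, List.append_assoc]
    congr 1

lemma pv_expandA (rest : List Int) (idxs : List Int) (acc : Array Int) :
    (idxs.foldl (fun acc i =>
      (PySem.List.pyRange 0 (PySem.List.pyGetD rest (i + 1) 0) 1).foldl
        (fun a _ => a.push (PySem.List.pyGetD rest i 0)) acc) acc).toList
    = acc.toList ++ idxs.flatMap (fun i =>
        List.replicate (PySem.List.pyGetD rest (i + 1) 0).toNat (PySem.List.pyGetD rest i 0)) := by
  induction idxs generalizing acc with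
  | nil => simp
  | cons i t ih =>
    rw [List.foldl_cons, ih, pv_rep_fold]
    simp only [List.flatMap_cons, PySem.List.length_pyRange_one]
    simp [List.flatMap]

lemma pv_reshape_inner (L : List Int) (l : List Int) (t : List Int) (c : Int) :
    l.foldl (fun (s : List Int × Int) _ => (s.1 ++ [PySem.List.pyGetD L s.2 0], s.2 + 1)) (t, c)
    = (t ++ (List.range l.length).map (fun (j : Nat) => PySem.List.pyGetD L (c + (j : Int)) 0),
       c + (l.length : Int)) := by
  induction l generalizing t c with
  | nil => simp
  | cons x tl ih =>
    simp only [List.foldl_cons, ih, List.length_cons, Prod.mk.injEq]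
    refine ⟨?_, by push_cast; ring⟩
    rw [List.range_succ_eq_map]
    simp only [List.map_cons, List.map_map, List.append_assoc, List.singleton_append]
    congr 1
    congr 1
    · simp
    · apply List.map_congr_left; intro j _; simp only [Function.comp_apply]
      congr 1; push_cast; ring

lemma pv_range2 (L : Nat) (h : L % 2 = 0) :
    PySem.List.pyRange 0 (L : Int) 2 = (List.range (L / 2)).map (fun k => ((2 * k : Nat) : Int)) := by
  rw [PySem.List.pyRange_of_pos _ _ (by norm_num)]
  rcases Nat.eq_zero_or_pos L with h0 | h0
  · simp [h0]
  · rw [if_pos (by exact_mod_cast h0)]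
    have : (((L : Int) - 0 + 2 - 1) / 2).toNat = L / 2 := by omega
    rw [this]
    apply List.map_congr_left
    intro k _; push_cast; ring

lemma pv_range2' (L : Nat) (h : L % 2 = 0) :
    PySem.List.pyRange 2 ((L + 2 : Nat) : Int) 2
      = (List.range (L / 2)).map (fun k => ((2 + 2 * k : Nat) : Int)) := by
  rw [PySem.List.pyRange_of_pos _ _ (by norm_num)]
  rcases Nat.eq_zero_or_pos L with h0 | h0
  · simp [h0]
  · rw [if_pos (by push_cast; omega)]
    have : ((((L + 2 : Nat) : Int) - 2 + 2 - 1) / 2).toNat = L / 2 := by push_cast; omega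
    rw [this]
    apply List.map_congr_left
    intro k _; push_cast; ring

lemma pv_sum_cast (l : List Nat) : ((l.sum : Nat) : Int) = (l.map Int.ofNat).sum := by
  induction l with
  | nil => simp
  | cons a t ih => simp [ih]

lemma pv_flatA (rest : List Int) (h : rest.length % 2 = 0) :
    ((PySem.List.pyRange 0 (PySem.List.len rest) 2).foldl
      (fun acc i =>
        (PySem.List.pyRange 0 (PySem.List.pyGetD rest (i + 1) 0) 1).foldl
          (fun a _ => a.push (PySem.List.pyGetD rest i 0)) acc) (#[] : Array Int)).toList
    = pvExpand (pvRuns rest) := by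
  rw [PySem.List.len_eq, pv_range2 _ h, pv_expandA]
  unfold pvExpand pvRuns
  rw [List.flatMap_map, List.flatMap_map]
  simp only [List.nil_append]
  apply List.flatMap_congr
  intro k hk
  have h1 : PySem.List.pyGetD rest ((2 * k : Nat) : Int) 0 = rest.getD (2 * k) 0 :=
    PySem.List.pyGetD_natCast ..
  have h2 : PySem.List.pyGetD rest (((2 * k : Nat) : Int) + 1) 0 = rest.getD (2 * k + 1) 0 := by
    have : ((2 * k : Nat) : Int) + 1 = ((2 * k + 1 : Nat) : Int) := by push_cast; ring
    rw [this, PySem.List.pyGetD_natCast]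
  rw [h1, h2]

lemma pv_reshape_outer (L : List Int) (n : Int) (l : List Int) (res : List (List Int)) (c : Int) :
    l.foldl (fun (st : List (List Int) × Int) _ =>
      let inner := (PySem.List.pyRange 0 n 1).foldl
        (fun (t : List Int × Int) _ => (t.1 ++ [PySem.List.pyGetD L t.2 0], t.2 + 1))
        (([] : List Int), st.2)
      (st.1 ++ [inner.1], inner.2)) (res, c)
    = (res ++ (List.range l.length).map (fun i => pvRowAt L n.toNat (c + ((i * n.toNat : Nat) : Int))),
       c + (l.length : Int) * (n.toNat : Int)) := by
  induction l generalizing res c with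
  | nil => simp
  | cons x tl ih =>
    rw [List.foldl_cons]
    dsimp only
    rw [pv_reshape_inner]
    dsimp only
    rw [ih]
    simp only [PySem.List.length_pyRange_one, List.length_cons, Prod.mk.injEq, List.nil_append]
    have hlen : ((n - 0).toNat : Int) = (n.toNat : Int) := by omega
    refine ⟨?_, by rw [hlen]; push_cast; ring⟩
    rw [List.range_succ_eq_map]
    simp only [List.map_cons, List.map_map, List.append_assoc, List.singleton_append]
    congr 1
    congr 1
    · unfold pvRowAt
      have : (n - 0).toNat = n.toNat := by omega
      rw [this]
      apply List.map_congr_left; intro j _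
      congr 1; push_cast; ring
    · apply List.map_congr_left; intro i _; simp only [Function.comp_apply]
      unfold pvRowAt
      apply List.map_congr_left; intro j _
      congr 1
      rw [hlen]; push_cast; ring

lemma pv_A_char (cd : List Int) (h2 : 2 ≤ cd.length) (he : cd.length % 2 = 0) :
    restore_image cd
    = (List.range (cd.getD 0 0).toNat).map (fun i =>
        pvRowAt (pvExpand (pvRuns (cd.drop 2))) (cd.getD 1 0).toNat
          (((i * (cd.getD 1 0).toNat : Nat) : Int))) := by
  unfold restore_image
  have hsl : PySem.List.slice cd (some 2) none = cd.drop 2 := by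
    have := PySem.List.slice_from (xs := cd) (a := 2) (by norm_num)
    simpa using this
  rw [hsl]
  dsimp only
  have hrest : (cd.drop 2).length % 2 = 0 := by simp [List.length_drop]; omega
  rw [pv_flatA _ hrest, pv_reshape_outer]
  dsimp only
  have hm : PySem.List.pyGetD cd 0 0 = cd.getD 0 0 := by
    simpa using PySem.List.pyGetD_natCast cd 0 0
  have hn : PySem.List.pyGetD cd 1 0 = cd.getD 1 0 := by
    simpa using PySem.List.pyGetD_natCast cd 1 0
  rw [hm, hn, PySem.List.length_pyRange_one]
  have : (cd.getD 0 0 - 0).toNat = (cd.getD 0 0).toNat := by omega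
  rw [this]
  simp only [List.nil_append]
  apply List.map_congr_left; intro i _
  congr 1; omega

lemma pv_rows_eq_chunks (flat : List Int) (M N : Nat) (h : M * N ≤ flat.length) :
    (List.range M).map (fun i => pvRowAt flat N ((i * N : Nat) : Int))
    = pvChunks (flat.take (M * N)) N M := by
  unfold pvChunks
  apply List.map_congr_left
  intro i hi
  rw [List.mem_range] at hi
  have hiN : (i + 1) * N ≤ M * N := Nat.mul_le_mul_right _ (by omega)
  apply List.ext_getElem
  · have he : (i + 1) * N = i * N + N := by ring
    simp [pvRowAt, List.length_take, List.length_drop]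
    omega
  · intro j hj1 hj2
    have hjN : j < N := by simpa [pvRowAt] using hj1
    have hidx : i * N + j < flat.length := by
      have : i * N + j < (i + 1) * N := by nlinarith
      omega
    simp only [pvRowAt, List.getElem_map, List.getElem_range, List.getElem_take,
      List.getElem_drop]
    have : ((i * N : Nat) : Int) + ((j : Nat) : Int) = (((i * N + j : Nat) : Nat) : Int) := by
      push_cast; ring
    rw [this, PySem.List.pyGetD_natCast]
    rw [List.getD_eq_getElem _ _ hidx]

lemma pv_expand_length (rs : List (Int × Int)) :
    (pvExpand rs).length = (rs.map (fun r => r.2.toNat)).sum := by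
  unfold pvExpand
  rw [List.length_flatMap]
  congr 1
  simp

-- row i of a chunked list, through Python indexing
lemma pv_chunks_get (P : List Int) (N M : Nat) (i : Nat) (hi : i < M) :
    PySem.List.pyGetD (pvChunks P N M) ((i : Nat) : Int) [] = (P.drop (i * N)).take N := by
  rw [PySem.List.pyGetD_natCast]
  unfold pvChunks
  rw [List.getD_eq_getElem _ _ (by simpa using hi)]
  simp

-- the while loop reaches exactly the first cursor position where its condition fails
lemma pvAdv_eq (grid : List (List Int)) (n m : Int) (q : Int)
    (hstop : ¬ (q < m ∧ n ≤ ((PySem.List.pyGetD grid q []).length : Int))) :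
    ∀ (k : Nat) (r : Int), (q - r).toNat ≤ k → 0 ≤ r → r ≤ q →
    (∀ i : Int, r ≤ i → i < q → i < m ∧ n ≤ ((PySem.List.pyGetD grid i []).length : Int)) →
    pvAdv grid n m r = q := by
  intro k
  induction k with
  | zero =>
    intro r hk h0 hrq _
    have : r = q := by omega
    subst this
    rw [pvAdv, dif_neg hstop]
  | succ k ih =>
    intro r hk h0 hrq hfull
    by_cases hrq' : r = q
    · subst hrq'; rw [pvAdv, dif_neg hstop]
    · have hlt : r < q := by omega
      rw [pvAdv, dif_pos (hfull r le_rfl hlt)]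
      exact ih (r + 1) (by omega) (by omega) (by omega)
        (fun i h1 h2 => hfull i (by omega) h2)

-- appending the next element into row q = |P|/N extends the chunking by that element
lemma pv_chunks_push (P : List Int) (v : Int) (N M q r : Nat) (hN : 0 < N)
    (hr : r < N) (hP : P.length = q * N + r) :
    (pvChunks P N M).modify q (fun row => row ++ [v]) = pvChunks (P ++ [v]) N M := by
  have hqN : q * N ≤ P.length := by omega
  apply List.ext_getElem
  · simp [pvChunks]
  · intro i h1 h2
    have hiM : i < M := by simpa [pvChunks] using h2
    rw [List.getElem_modify]
    by_cases hiq : q = i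
    · subst hiq
      rw [if_pos rfl]
      simp only [pvChunks, List.getElem_map, List.getElem_range]
      have hX : (P.drop (q * N)).length = r := by simp; omega
      rw [List.drop_append_of_le_length hqN, List.take_append]
      rw [List.take_of_length_le (by rw [hX]; omega)]
      rw [List.take_of_length_le (l := [v]) (by simp [hX]; omega)]
    · rw [if_neg hiq]
      simp only [pvChunks, List.getElem_map, List.getElem_range]
      rcases Nat.lt_or_ge i q with hlt | hge
      · have hfull : i * N + N ≤ P.length := by
          have h1 : (i + 1) * N ≤ q * N := Nat.mul_le_mul_right _ (by omega)
          have he : (i + 1) * N = i * N + N := by ring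
          omega
        rw [List.drop_append_of_le_length (by omega),
          List.take_append_of_le_length (by simp; omega)]
      · have hgt' : q < i := by omega
        have hbig : P.length + 1 ≤ i * N := by
          have h1 : (q + 1) * N ≤ i * N := Nat.mul_le_mul_right _ (by omega)
          have he : (q + 1) * N = q * N + N := by ring
          omega
        rw [List.drop_of_length_le (show P.length ≤ i * N by omega),
          List.drop_of_length_le (show (P ++ [v]).length ≤ i * N by simp; omega)]

-- one push preserves the invariant
lemma pv_step_rel (m n v : Int) (P : List Int) (s : List (List Int) × Int × Bool)
    (h : pvRel m n P s) : pvRel m n (P ++ [v]) (pvStep m n v s) := by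
  obtain ⟨hg, hr0, hdone, hnd⟩ := h
  by_cases hb : s.2.2 = true
  · have hTP : m.toNat * n.toNat ≤ P.length := hdone hb
    unfold pvStep
    rw [if_pos hb]
    refine ⟨?_, hr0, fun _ => by simp; omega, fun hf => absurd hb (by simp [hf])⟩
    rw [hg, List.take_append_of_le_length hTP]
  · have hb' : s.2.2 = false := by simpa using hb
    have hrle := hnd hb'
    unfold pvStep
    rw [if_neg (by simp [hb'])]
    dsimp only
    by_cases hfull : m.toNat * n.toNat ≤ P.length
    · -- the grid is already full: the cursor runs to m and the early return fires
      have hadv : pvAdv s.1 n m s.2.1 = max m s.2.1 := by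
        refine pvAdv_eq _ _ _ _ ?_ _ _ le_rfl hr0 (by omega) ?_
        · rintro ⟨hc1, -⟩; omega
        · intro i hi1 hi2
          have him : i < m := by omega
          refine ⟨him, ?_⟩
          have hiM : i.toNat < m.toNat := by omega
          have hrow : PySem.List.pyGetD s.1 i []
              = ((P.take (m.toNat * n.toNat)).drop (i.toNat * n.toNat)).take n.toNat := by
            rw [hg, show i = ((i.toNat : Nat) : Int) by omega]
            exact pv_chunks_get _ _ _ _ hiM
          rw [hrow]
          have hlenrow : (((P.take (m.toNat * n.toNat)).drop (i.toNat * n.toNat)).take n.toNat).length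
              = n.toNat := by
            have h1 : (i.toNat + 1) * n.toNat ≤ m.toNat * n.toNat :=
              Nat.mul_le_mul_right _ (by omega)
            have he : (i.toNat + 1) * n.toNat = i.toNat * n.toNat + n.toNat := by ring
            simp
            omega
          rw [hlenrow]
          omega
      rw [hadv, if_pos (le_max_left m s.2.1)]
      refine ⟨?_, by show (0 : Int) ≤ max m s.2.1; omega, fun _ => by simp; omega, by simp⟩
      rw [hg, List.take_append_of_le_length hfull]
    · -- still filling: the cursor stops at the current partial row, the element is appended
      push_neg at hfull
      have hM0 : 0 < m.toNat := by
        rcases Nat.eq_zero_or_pos m.toNat with h0 | h0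
        · rw [h0, Nat.zero_mul] at hfull; omega
        · exact h0
      have hN0 : 0 < n.toNat := by
        rcases Nat.eq_zero_or_pos n.toNat with h0 | h0
        · rw [h0, Nat.mul_zero] at hfull; omega
        · exact h0
      obtain ⟨q, r, hr, hP⟩ : ∃ q r, r < n.toNat ∧ P.length = q * n.toNat + r :=
        ⟨P.length / n.toNat, P.length % n.toNat, Nat.mod_lt _ hN0, (Nat.div_add_mod' _ _).symm⟩
      have hqM : q < m.toNat := by
        have : q * n.toNat < m.toNat * n.toNat := by omega
        exact Nat.lt_of_mul_lt_mul_right this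
      have hPtake : P.take (m.toNat * n.toNat) = P := List.take_of_length_le (by omega)
      have hdivP : min P.length (m.toNat * n.toNat) / n.toNat = q := by
        have hmin : min P.length (m.toNat * n.toNat) = P.length := by omega
        rw [hmin, hP, Nat.mul_comm q, Nat.mul_add_div hN0, Nat.div_eq_of_lt hr]
        omega
      have hrq : s.2.1 ≤ (q : Int) := by rw [hdivP] at hrle; omega
      have hadv : pvAdv s.1 n m s.2.1 = (q : Int) := by
        refine pvAdv_eq _ _ _ _ ?_ _ _ le_rfl hr0 hrq ?_
        · rintro ⟨hc1, hc2⟩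
          have hrowq : PySem.List.pyGetD s.1 ((q : Nat) : Int) []
              = (P.drop (q * n.toNat)).take n.toNat := by
            rw [hg, hPtake]; exact pv_chunks_get _ _ _ _ hqM
          rw [hrowq] at hc2
          have hlq : ((P.drop (q * n.toNat)).take n.toNat).length = r := by simp; omega
          rw [hlq] at hc2
          omega
        · intro i hi1 hi2
          have hiq : i.toNat < q := by omega
          refine ⟨by omega, ?_⟩
          have hiM : i.toNat < m.toNat := by omega
          have hrow : PySem.List.pyGetD s.1 i [] = (P.drop (i.toNat * n.toNat)).take n.toNat := by
            rw [hg, hPtake, show i = ((i.toNat : Nat) : Int) by omega]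
            exact pv_chunks_get _ _ _ _ hiM
          rw [hrow]
          have hfull' : i.toNat * n.toNat + n.toNat ≤ P.length := by
            have h1 : (i.toNat + 1) * n.toNat ≤ q * n.toNat := Nat.mul_le_mul_right _ (by omega)
            have he : (i.toNat + 1) * n.toNat = i.toNat * n.toNat + n.toNat := by ring
            omega
          have hli : ((P.drop (i.toNat * n.toNat)).take n.toNat).length = n.toNat := by simp; omega
          rw [hli]; omega
      rw [hadv, if_neg (by omega)]
      refine ⟨?_, by show (0 : Int) ≤ ((q : Nat) : Int); omega, by simp, ?_⟩
      · rw [hg, hPtake, show ((q : Int)).toNat = q from by omega]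
        rw [pv_chunks_push P v n.toNat m.toNat q r hN0 hr hP]
        rw [List.take_of_length_le (by simp; omega)]
      · intro _
        rw [show ((q : Int)).toNat = q from by omega,
          show (P ++ [v]).length = P.length + 1 from by simp]
        rw [Nat.le_div_iff_mul_le hN0]
        omega

-- pushing a whole run of identical elements
lemma pv_step_fold (m n v : Int) (l : List Int) (P : List Int)
    (s : List (List Int) × Int × Bool) (h : pvRel m n P s) :
    pvRel m n (P ++ List.replicate l.length v) (l.foldl (fun s' _ => pvStep m n v s') s) := by
  induction l generalizing P s with
  | nil => simpa using h
  | cons x t ih =>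
    rw [List.foldl_cons]
    have := ih (P ++ [v]) (pvStep m n v s) (pv_step_rel m n v P s h)
    simpa [List.replicate_succ, List.append_assoc] using this

-- folding over all runs streams in exactly the RLE expansion
lemma pv_runs_fold (m n : Int) (rs : List (Int × Int)) (Q : List Int)
    (s : List (List Int) × Int × Bool) (h : pvRel m n Q s) :
    pvRel m n (Q ++ pvExpand rs)
      (rs.foldl (fun s r =>
        (PySem.List.pyRange 0 r.2 1).foldl (fun s' _ => pvStep m n r.1 s') s) s) := by
  induction rs generalizing Q s with
  | nil => simpa [pvExpand] using h
  | cons rhd rtl ih =>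
    rw [List.foldl_cons]
    have hlen : (PySem.List.pyRange 0 rhd.2 1).length = rhd.2.toNat := by
      rw [PySem.List.length_pyRange_one]; omega
    have hstep := pv_step_fold m n rhd.1 (PySem.List.pyRange 0 rhd.2 1) Q s h
    rw [hlen] at hstep
    have := ih (Q ++ List.replicate rhd.2.toNat rhd.1) _ hstep
    simpa [pvExpand, List.append_assoc] using this

-- ===== VERDICT (by name: the statement is the Claim_ definition above) =====
theorem restore_image_spec : Claim_equal_restore_image := by
  intro cd _hdom hpre
  obtain ⟨h2, he, hsum⟩ := hpre
  unfold Spec_restore_image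
  rw [pv_A_char cd h2 he]
  unfold restore_image_alt
  dsimp only
  have hm : PySem.List.pyGetD cd 0 0 = cd.getD 0 0 := by
    simpa using PySem.List.pyGetD_natCast cd 0 0
  have hn : PySem.List.pyGetD cd 1 0 = cd.getD 1 0 := by
    simpa using PySem.List.pyGetD_natCast cd 1 0
  rw [hm, hn]
  set m := cd.getD 0 0 with hmdef
  set n := cd.getD 1 0 with hndef
  set rest := cd.drop 2 with hrest
  set flat := pvExpand (pvRuns rest) with hflatdef
  set M := m.toNat with hMdef
  set N := n.toNat with hNdef
  have hcl : cd.length = rest.length + 2 := by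
    rw [hrest, List.length_drop]; omega
  have heR : rest.length % 2 = 0 := by
    rw [hrest, List.length_drop]; omega
  have hgetrest : ∀ (i : Nat), rest.getD i 0 = cd.getD (2 + i) 0 := by
    intro i
    rw [hrest, List.getD_eq_getElem?_getD, List.getD_eq_getElem?_getD, List.getElem?_drop]
  -- the flat expansion holds at least M*N elements (trivially so unless m,n > 0)
  have hflatlen : M * N ≤ flat.length := by
    by_cases hmn : 0 < m ∧ 0 < n
    · have hK : (cd.length - 2) / 2 = rest.length / 2 := by omega
      rw [hK] at hsum
      have hlen1 : flat.length = ((List.range (rest.length / 2)).map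
          (fun k => (rest.getD (2 * k + 1) 0).toNat)).sum := by
        rw [hflatdef, pv_expand_length]
        unfold pvRuns
        rw [List.map_map]
        rfl
      have hcast : ((flat.length : Nat) : Int) = ((List.range (rest.length / 2)).map
          (fun k => max (cd.getD (3 + 2 * k) 0) 0)).sum := by
        rw [hlen1, pv_sum_cast, List.map_map]
        apply congrArg
        apply List.map_congr_left
        intro k _
        simp only [Function.comp_apply, Int.ofNat_eq_natCast]
        rw [Int.toNat_eq_max, hgetrest (2 * k + 1)]
        have : 2 + (2 * k + 1) = 3 + 2 * k := by omega
        rw [this]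
      have hmnZ : ((M * N : Nat) : Int) = m * n := by
        push_cast
        rw [hMdef, hNdef, Int.toNat_of_nonneg (by omega), Int.toNat_of_nonneg (by omega)]
      have := hsum hmn.1 hmn.2
      omega
    · have hz : M * N = 0 := by
        rcases not_and_or.mp hmn with hc | hc
        · have h0 : M = 0 := by omega
          rw [h0, Nat.zero_mul]
        · have h0 : N = 0 := by omega
          rw [h0, Nat.mul_zero]
      omega
  -- rewrite B's fold into the runs fold and apply the invariant
  have hLcd : PySem.List.len cd = ((rest.length + 2 : Nat) : Int) := by
    rw [PySem.List.len_eq, hcl]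
  rw [hLcd, pv_range2' _ heR, List.foldl_map]
  have hgrid0 : ((PySem.List.pyRange 0 m 1).map (fun _ => ([] : List Int)))
      = pvChunks (([] : List Int).take (M * N)) N M := by
    rw [List.map_const', PySem.List.length_pyRange_one]
    unfold pvChunks
    simp only [List.take_nil, List.drop_nil]
    rw [List.map_const']
    simp only [List.length_range]
    congr 1
    omega
  have hinit : pvRel m n [] (((PySem.List.pyRange 0 m 1).map (fun _ => ([] : List Int))),
      (0 : Int), false) := by
    refine ⟨hgrid0, le_rfl, by simp, by simp⟩
  have hstep : (fun (s : List (List Int) × Int × Bool) (k : Nat) =>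
        let value := PySem.List.pyGetD cd (((2 + 2 * k : Nat) : Int)) 0
        let cnt := PySem.List.pyGetD cd (((2 + 2 * k : Nat) : Int) + 1) 0
        (PySem.List.pyRange 0 cnt 1).foldl (fun s' _ => pvStep m n value s') s)
      = (fun (s : List (List Int) × Int × Bool) (k : Nat) =>
        (PySem.List.pyRange 0 ((fun k => (rest.getD (2 * k) 0, rest.getD (2 * k + 1) 0)) k).2 1).foldl
          (fun s' _ => pvStep m n ((fun k => (rest.getD (2 * k) 0, rest.getD (2 * k + 1) 0)) k).1 s') s) := by
    funext s k
    dsimp only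
    have h1 : PySem.List.pyGetD cd (((2 + 2 * k : Nat) : Int)) 0 = rest.getD (2 * k) 0 := by
      rw [PySem.List.pyGetD_natCast, hgetrest (2 * k)]
    have h2' : PySem.List.pyGetD cd (((2 + 2 * k : Nat) : Int) + 1) 0 = rest.getD (2 * k + 1) 0 := by
      have hc : ((2 + 2 * k : Nat) : Int) + 1 = ((2 + (2 * k + 1) : Nat) : Int) := by push_cast; ring
      rw [hc, PySem.List.pyGetD_natCast, hgetrest (2 * k + 1)]
    rw [h1, h2']
  rw [hstep]
  have hrunsfold := pv_runs_fold m n (pvRuns rest) [] _ hinit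
  have hruns : pvRuns rest = (List.range (rest.length / 2)).map
      (fun k => (rest.getD (2 * k) 0, rest.getD (2 * k + 1) 0)) := rfl
  rw [hruns, List.foldl_map] at hrunsfold
  obtain ⟨hgrid, -, -, -⟩ := hrunsfold
  rw [hgrid]
  rw [List.nil_append, ← hruns, ← hflatdef]
  exact pv_rows_eq_chunks flat M N hflatlen
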